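-- pv_equiv track=rewrite | github.com/simhayer/InvestmentsBackend | services/ai/analyze_symbol/facts_pack_service.py | build_sec_flags
-- ===== SOURCE A (Python) =====
-- from typing import Dict, List, Any
--
-- def build_sec_flags(sec_risks: List[Dict[str, any]]) -> List[str]:
--     flags = []
--     for r in sec_risks:
--         txt = (r.get("text", "")).lower()
--         if "supply" in txt:
--             flags.append("supply_chain_dependency")
--         if "services" in txt:
--             flags.append("services_growth_focus")
--     return list(set(flags))
-- ===== SOURCE B (Python) =====
-- def build_sec_flags(sec_risks):
--     has_supply = any("supply" in r.get("text", "").lower() for r in sec_risks)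
--     has_services = any("services" in r.get("text", "").lower() for r in sec_risks)
--     flags = []
--     if has_supply:
--         flags.append("supply_chain_dependency")
--     if has_services:
--         flags.append("services_growth_focus")
--     return flags
-- ===== Notes on version B (the rewrite author's own statement) =====
-- stated objective: idiomatic
-- what changed: A makes one element-keyed pass appending (possibly duplicate) flags and dedups via list(set(...)); B computes two independent any(...) booleans over the whole list and builds the (already duplicate-free) flag list directly, with no set; Pre_ excludes inputs where both flags fire, since there A's list(set(...)) order depends on PYTHONHASHSEED.
import Mathlib
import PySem

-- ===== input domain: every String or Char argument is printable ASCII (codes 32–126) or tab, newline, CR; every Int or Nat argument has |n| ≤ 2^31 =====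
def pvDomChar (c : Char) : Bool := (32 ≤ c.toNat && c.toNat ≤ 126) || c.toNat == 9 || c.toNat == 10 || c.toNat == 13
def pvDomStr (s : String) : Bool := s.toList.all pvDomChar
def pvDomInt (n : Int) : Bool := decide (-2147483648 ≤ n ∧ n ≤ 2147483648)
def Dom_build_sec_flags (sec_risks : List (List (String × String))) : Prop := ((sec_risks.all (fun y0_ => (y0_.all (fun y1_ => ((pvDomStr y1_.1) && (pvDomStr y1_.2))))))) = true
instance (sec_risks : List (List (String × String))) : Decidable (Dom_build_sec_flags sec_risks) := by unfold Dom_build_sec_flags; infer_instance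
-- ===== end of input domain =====

-- ===== PORT A =====
-- Header: B replaces A's single element-keyed pass (append flags, dedup via list(set(...))) by two any(...)
-- scans and direct list construction (idiomatic; no speed claim). list(set(flags)) iterates a Python set whose
-- order is hash-dependent when it has 2 elements, so Pre_ admits only inputs where at most one flag can fire;
-- there PySem.Set.ofList (first-occurrence dedup) is exact.
def build_sec_flags (sec_risks : List (List (String × String))) : List String :=
  let flags := sec_risks.foldl (fun flags r =>
    let txt := PySem.Str.lower (PySem.Dict.getD (PySem.Dict.mk r) "text" "")
    let flags := if PySem.Str.isIn "supply" txt then flags ++ ["supply_chain_dependency"] else flags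
    if PySem.Str.isIn "services" txt then flags ++ ["services_growth_focus"] else flags) []
  PySem.Set.ofList flags

-- ===== PORT B =====
def build_sec_flags_alt (sec_risks : List (List (String × String))) : List String :=
  let has_supply := sec_risks.any (fun r =>
    PySem.Str.isIn "supply" (PySem.Str.lower (PySem.Dict.getD (PySem.Dict.mk r) "text" "")))
  let has_services := sec_risks.any (fun r =>
    PySem.Str.isIn "services" (PySem.Str.lower (PySem.Dict.getD (PySem.Dict.mk r) "text" "")))
  let flags : List String := []
  let flags := if has_supply then flags ++ ["supply_chain_dependency"] else flags
  if has_services then flags ++ ["services_growth_focus"] else flags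

-- ===== PRECONDITION & SPEC =====
def pvTextHas (sub : String) (r : List (String × String)) : Bool :=
  PySem.Str.isIn sub (PySem.Str.lower (PySem.Dict.getD (PySem.Dict.mk r) "text" ""))

-- Pre_ excludes inputs on which A returns: exactly those where some record's text contains "supply" AND some
-- record's text contains "services" — there A returns both flags in Python's hash-dependent set order, an
-- accidental ordering no one would specify; B returns them in fixed order.
def Pre_build_sec_flags (sec_risks : List (List (String × String))) : Prop :=
  ¬ ((sec_risks.any (pvTextHas "supply")) = true ∧ (sec_risks.any (pvTextHas "services")) = true)
instance (sec_risks : List (List (String × String))) : Decidable (Pre_build_sec_flags sec_risks) := by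
  unfold Pre_build_sec_flags; infer_instance
def pvWitness_build_sec_flags : (List (List (String × String))) := [[("text", "Supply chain risk")]]
def Spec_build_sec_flags (sec_risks : List (List (String × String))) (out : List String) : Prop := out = build_sec_flags_alt sec_risks
instance (sec_risks : List (List (String × String))) (out : List String) : Decidable (Spec_build_sec_flags sec_risks out) := by unfold Spec_build_sec_flags; infer_instance

-- ===== CLAIM (what is proved, stated in full; the proofs are below) =====
def Claim_equal_build_sec_flags : Prop := ∀ (sec_risks : List (List (String × String))), Dom_build_sec_flags sec_risks → Pre_build_sec_flags sec_risks → Spec_build_sec_flags sec_risks (build_sec_flags sec_risks)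

-- ===== LEMMAS AND PROOFS =====

-- the per-record contribution of A's loop body
def pvG (r : List (String × String)) : List String :=
  (if pvTextHas "supply" r then ["supply_chain_dependency"] else []) ++
  (if pvTextHas "services" r then ["services_growth_focus"] else [])

lemma pvA_flags (sec_risks : List (List (String × String))) :
    build_sec_flags sec_risks = PySem.Set.ofList (sec_risks.flatMap pvG) := by
  unfold build_sec_flags
  rw [show (fun (flags : List String) (r : List (String × String)) =>
      let txt := PySem.Str.lower (PySem.Dict.getD (PySem.Dict.mk r) "text" "")
      let flags := if PySem.Str.isIn "supply" txt then flags ++ ["supply_chain_dependency"] else flags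
      if PySem.Str.isIn "services" txt then flags ++ ["services_growth_focus"] else flags)
      = (fun flags r => flags ++ pvG r) from ?_]
  · rw [PySem.List.foldl_append_eq_flatMap]; simp
  · funext flags r
    cases h1 : pvTextHas "supply" r <;> cases h2 : pvTextHas "services" r <;>
      simp only [pvTextHas] at h1 h2 <;> simp at h1 h2 <;>
      simp [pvG, pvTextHas, h1, h2]

lemma pv_foldl_add_of_mem {L s : List String} (h : ∀ x ∈ L, x ∈ s) :
    L.foldl PySem.Set.add s = s := by
  induction L generalizing s with
  | nil => rfl
  | cons a t ih =>
    have ha : a ∈ s := h a (by simp)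
    have hadd : PySem.Set.add s a = s := by
      simp [PySem.Set.add, PySem.Set.contains_eq_listContains, ha]
    simp only [List.foldl_cons, hadd]
    exact ih (fun x hx => h x (by simp [hx]))

lemma pv_ofList_const {s1 : String} {L : List String} (h1 : ∀ x ∈ L, x = s1) (h2 : L ≠ []) :
    PySem.Set.ofList L = [s1] := by
  cases L with
  | nil => cases h2 rfl
  | cons a t =>
    have ha : a = s1 := h1 a (by simp)
    rw [PySem.Set.ofList_eq_foldl]
    simp only [List.foldl_cons]
    have hadd : PySem.Set.add ([] : List String) a = [a] := by
      simp [PySem.Set.add, PySem.Set.contains_eq_listContains]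
    rw [hadd, ha]
    exact pv_foldl_add_of_mem (fun x hx => by
      have := h1 x (by simp [hx]); simp [this])

lemma pv_alt_eval (sec_risks : List (List (String × String))) :
    build_sec_flags_alt sec_risks =
      (if sec_risks.any (pvTextHas "supply") then ["supply_chain_dependency"] else []) ++
      (if sec_risks.any (pvTextHas "services") then ["services_growth_focus"] else []) := by
  unfold build_sec_flags_alt pvTextHas
  cases h1 : sec_risks.any (fun r =>
      PySem.Str.isIn "supply" (PySem.Str.lower (PySem.Dict.getD (PySem.Dict.mk r) "text" ""))) <;>
    cases h2 : sec_risks.any (fun r =>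
      PySem.Str.isIn "services" (PySem.Str.lower (PySem.Dict.getD (PySem.Dict.mk r) "text" ""))) <;>
    simp at h1 h2 <;> simp [h1, h2]

-- ===== VERDICT (by name: the statement is the Claim_ definition above) =====
theorem build_sec_flags_spec : Claim_equal_build_sec_flags := by
  intro xs _hdom hpre
  unfold Spec_build_sec_flags
  rw [pvA_flags, pv_alt_eval]
  cases hs : xs.any (pvTextHas "supply") <;> cases hv : xs.any (pvTextHas "services")
  · -- neither substring occurs: both sides empty
    have hnil : xs.flatMap pvG = [] := by
      rw [List.flatMap_eq_nil_iff]
      intro r hr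
      have h1 := (List.any_eq_false.mp hs) r hr
      have h2 := (List.any_eq_false.mp hv) r hr
      simp [pvG, h1, h2]
    simp [hnil]
  · -- services only
    obtain ⟨r0, hr0, hp0⟩ := List.any_eq_true.mp hv
    have hmem : "services_growth_focus" ∈ xs.flatMap pvG := by
      refine List.mem_flatMap.mpr ⟨r0, hr0, ?_⟩
      simp [pvG, hp0]
    have hall : ∀ x ∈ xs.flatMap pvG, x = "services_growth_focus" := by
      intro x hx
      obtain ⟨r, hr, hxr⟩ := List.mem_flatMap.mp hx
      have h1 := (List.any_eq_false.mp hs) r hr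
      simp [pvG, h1] at hxr
      rcases hxr with ⟨-, h⟩; exact h
    rw [pv_ofList_const hall (List.ne_nil_of_mem hmem)]
    simp
  · -- supply only
    obtain ⟨r0, hr0, hp0⟩ := List.any_eq_true.mp hs
    have hmem : "supply_chain_dependency" ∈ xs.flatMap pvG := by
      refine List.mem_flatMap.mpr ⟨r0, hr0, ?_⟩
      simp [pvG, hp0]
    have hall : ∀ x ∈ xs.flatMap pvG, x = "supply_chain_dependency" := by
      intro x hx
      obtain ⟨r, hr, hxr⟩ := List.mem_flatMap.mp hx
      have h2 := (List.any_eq_false.mp hv) r hr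
      simp [pvG, h2] at hxr
      rcases hxr with ⟨-, h⟩; exact h
    rw [pv_ofList_const hall (List.ne_nil_of_mem hmem)]
    simp
  · -- both occur: excluded by Pre_
    exact absurd ⟨hs, hv⟩ hpre
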